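-- pv_equiv track=rewrite | github.com/lopez86/euler | euler001_050/prob0027.py | QuadraticPrimes
-- ===== SOURCE A (Python) =====
-- def GetListOfPrimes(Nmax):
--
--   if Nmax<2: return []
--   if Nmax==2: return [2]
--
--   primes = [2]
--
--   for i in range(3,Nmax+1):
--     isPrime = True
--
--     for p in primes:
--       if i % p ==0:
--         isPrime = False
--         break
--
--     if isPrime is True:
--       primes.append(i)
--
--   return primes
--
-- def QuadraticPrimes(max_coeff):
--
-- # b must be prime
--   primes = GetListOfPrimes(2*max_coeff+1)
--
--   max_primes = 0
--   coef_prod = 0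
--   for b in primes:
--     if b > max_coeff:
--       continue
--     for p in primes:
--       a = p - b - 1
--       if abs(a) >= max_coeff:
--         continue
--
--       n = 2
--
--       while( n*n + a*n + b in primes):
--         n += 1
--
--       if n > max_primes:
--         max_primes = n
--         coef_prod = a*b
--
--   return coef_prod,max_primes
-- ===== SOURCE B (Python) =====
-- def QuadraticPrimes(max_coeff):
--     limit = 2 * max_coeff + 1
--     # primality by trial division up to sqrt (instead of A's divide-by-all-smaller-primes)
--     def is_prime(n):
--         if n < 2:
--             return False
--         d = 2
--         while d * d <= n:
--             if n % d == 0: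
--                 return False
--             d += 1
--         return True
--
--     primes = [x for x in range(2, limit + 1) if is_prime(x)]
--     prime_set = set(primes)
--
--     best_prod, best_n = 0, 0
--     for b in primes:
--         if b > max_coeff:
--             break  # primes is ascending
--         for a in range(1 - max_coeff, max_coeff):
--             if a + b + 1 not in prime_set:
--                 continue
--             n = 2
--             while n * n + a * n + b in prime_set:
--                 n += 1
--             if n > best_n:
--                 best_prod, best_n = a * b, n
--     return best_prod, best_n
-- ===== Notes on version B (the rewrite author's own statement) =====
-- stated objective: faster
-- what changed: Prime generation switches from trial division by every previously found prime to sqrt-bounded trial division, the hot while-loop tests membership in a set instead of scanning the prime list, the inner loop runs directly over the candidate a-range with an O(1) primality check instead of scanning all primes p and deriving a=p-b-1, and the outer loop breaks at the first prime above max_coeff instead of scanning the whole list.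
import Mathlib
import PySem

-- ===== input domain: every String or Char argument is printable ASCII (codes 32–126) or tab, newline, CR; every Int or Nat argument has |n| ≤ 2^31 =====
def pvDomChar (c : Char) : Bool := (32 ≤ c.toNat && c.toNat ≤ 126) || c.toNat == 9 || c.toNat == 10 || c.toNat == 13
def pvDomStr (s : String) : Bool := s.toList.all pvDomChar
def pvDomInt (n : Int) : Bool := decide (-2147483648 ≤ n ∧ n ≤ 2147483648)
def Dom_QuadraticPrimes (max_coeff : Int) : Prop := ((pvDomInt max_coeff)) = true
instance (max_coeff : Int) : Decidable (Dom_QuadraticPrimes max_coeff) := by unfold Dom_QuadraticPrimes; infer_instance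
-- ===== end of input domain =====

-- B replaces A's generate-primes-by-dividing-by-all-previous-primes and list-scan membership
-- with sqrt-bounded trial division, a set for the hot membership test, and a direct scan of the
-- candidate a-range; measured faster. Return value only (no argument is mutated by either).

-- ===== PORT A =====
-- literal port of GetListOfPrimes: the inner `for p in primes: … break` is an existence scan
def GetListOfPrimes (Nmax : Int) : List Int :=
  if Nmax < 2 then []
  else if Nmax == 2 then [2]
  else
    (PySem.List.pyRange 3 (Nmax + 1) 1).foldl
      (fun primes i =>
        if primes.any (fun p => PySem.Int.mod i p == 0) then primes else primes ++ [i])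
      [2]

-- A's `while n*n+a*n+b in primes: n += 1`; the fuel argument is only a totality guard
def pvWhileA (primes : List Int) (a b : Int) : Nat → Int → Int
  | 0, n => n
  | fuel + 1, n => if (n * n + a * n + b) ∈ primes then pvWhileA primes a b fuel (n + 1) else n

def QuadraticPrimes (max_coeff : Int) : Int × Int :=
  let primes := GetListOfPrimes (2 * max_coeff + 1)
  primes.foldl
    (fun st b =>
      if b > max_coeff then st
      else
        primes.foldl
          (fun st p =>
            let a := p - b - 1
            if |a| ≥ max_coeff then st
            else
              let n := pvWhileA primes a b (2 * max_coeff + 8).toNat 2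
              if n > st.2 then (a * b, n) else st)
          st)
    (0, 0)

-- ===== PORT B =====
-- Source B's is_prime loop: d from 2 while d*d <= n; the fuel argument is only a totality guard
def pvIsPrimeLoop (n : Int) : Nat → Int → Bool
  | 0, _ => true
  | fuel + 1, d =>
    if d * d ≤ n then
      (if PySem.Int.mod n d == 0 then false else pvIsPrimeLoop n fuel (d + 1))
    else true

def pvIsPrime (n : Int) : Bool := if n < 2 then false else pvIsPrimeLoop n (n.toNat + 2) 2

-- Source B: primes = [x for x in range(2, limit+1) if is_prime(x)]
def pvPrimesB (limit : Int) : List Int :=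
  (PySem.List.pyRange 2 (limit + 1) 1).filter pvIsPrime

-- Source B's `while n*n+a*n+b in prime_set: n += 1`; fuel is only a totality guard (same guard as A's port)
def pvWhileB (pset : PySem.Set Int) (a b : Int) : Nat → Int → Int
  | 0, n => n
  | fuel + 1, n =>
    if PySem.Set.contains pset (n * n + a * n + b) then pvWhileB pset a b fuel (n + 1) else n

def QuadraticPrimes_alt (max_coeff : Int) : Int × Int :=
  let limit := 2 * max_coeff + 1
  let primes := pvPrimesB limit
  let pset := PySem.Set.ofList primes
  -- `for b in primes: if b > max_coeff: break` = iterate over the takeWhile prefix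
  (primes.takeWhile (fun b => !decide (b > max_coeff))).foldl
    (fun st b =>
      (PySem.List.pyRange (1 - max_coeff) max_coeff 1).foldl
        (fun st a =>
          if !PySem.Set.contains pset (a + b + 1) then st
          else
            let n := pvWhileB pset a b (2 * max_coeff + 8).toNat 2
            if n > st.2 then (a * b, n) else st)
        st)
    (0, 0)

-- ===== PRECONDITION & SPEC =====
def Spec_QuadraticPrimes (max_coeff : Int) (out : Int × Int) : Prop := out = QuadraticPrimes_alt max_coeff
instance (max_coeff : Int) (out : Int × Int) : Decidable (Spec_QuadraticPrimes max_coeff out) := by unfold Spec_QuadraticPrimes; infer_instance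

-- ===== CLAIM (what is proved, stated in full; the proofs are below) =====
def Claim_equal_QuadraticPrimes : Prop := ∀ (max_coeff : Int), Dom_QuadraticPrimes max_coeff → Spec_QuadraticPrimes max_coeff (QuadraticPrimes max_coeff)

-- ===== LEMMAS AND PROOFS =====

theorem mod_dvd (n d : Int) : (PySem.Int.mod n d == 0) = true ↔ d ∣ n := by
  simp [PySem.Int.mod_eq_zero_iff_dvd]

-- pvIsPrimeLoop with enough fuel decides: no divisor e of n with d ≤ e and e*e ≤ n
theorem pvIsPrimeLoop_iff (n : Int) : ∀ (f : Nat) (d : Int), 2 ≤ d → (n + 1 - d).toNat < f →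
    (pvIsPrimeLoop n f d = true ↔ ∀ e : Int, d ≤ e → e * e ≤ n → ¬ e ∣ n)
  | 0, d, _, hf => absurd hf (by omega)
  | f + 1, d, hd, hf => by
    rw [pvIsPrimeLoop]
    by_cases h : d * d ≤ n
    · have hdn : d ≤ n := le_trans (by nlinarith) h
      rw [if_pos h]
      by_cases hmod : (PySem.Int.mod n d == 0) = true
      · rw [if_pos hmod]
        exact iff_of_false (by simp) (fun H => H d le_rfl h ((mod_dvd n d).mp hmod))
      · rw [if_neg hmod]
        rw [pvIsPrimeLoop_iff n f (d + 1) (by omega) (by omega)]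
        constructor
        · intro H e he h2 hdvd
          rcases eq_or_lt_of_le he with heq | hlt
          · subst heq; exact hmod ((mod_dvd n d).mpr hdvd)
          · exact H e (by omega) h2 hdvd
        · intro H e he h2 hdvd
          exact H e (by omega) h2 hdvd
    · rw [if_neg h]
      refine iff_of_true rfl ?_
      intro e he h2 _
      exact h (le_trans (by nlinarith) h2)

-- pvIsPrime decides primality over Int
theorem pvIsPrime_iff (n : Int) :
    pvIsPrime n = true ↔ (2 ≤ n ∧ ∀ d : Int, 2 ≤ d → d < n → ¬ d ∣ n) := by
  unfold pvIsPrime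
  by_cases hn : n < 2
  · rw [if_pos hn]; simp; omega
  · rw [if_neg hn]
    rw [pvIsPrimeLoop_iff n (n.toNat + 2) 2 le_rfl (by omega)]
    rw [not_lt] at hn
    constructor
    · intro H
      refine ⟨hn, fun d hd hdn hdvd => ?_⟩
      obtain ⟨e, he⟩ := hdvd
      have he2 : 2 ≤ e := by nlinarith
      by_cases hde : d ≤ e
      · exact H d hd (by nlinarith) ⟨e, he⟩
      · exact H e he2 (by nlinarith) ⟨d, by rw [he]; ring⟩
    · rintro ⟨h2, H⟩ e he hsq hdvd
      have hen : e < n := by nlinarith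
      exact H e he hen hdvd

-- if i ≥ 3 has a divisor in [2, i) then it has a pvIsPrime divisor in [2, i)
theorem exists_prime_divisor (i : Int) (hi : 3 ≤ i)
    (hex : ∃ d : Int, 2 ≤ d ∧ d < i ∧ d ∣ i) :
    ∃ p : Int, 2 ≤ p ∧ p < i ∧ pvIsPrime p = true ∧ p ∣ i := by
  obtain ⟨d, hd2, hdi, hdvd⟩ := hex
  have ht3 : 3 ≤ i.toNat := by omega
  have hcast : (i.toNat : Int) = i := by omega
  have hdn : d.toNat ∣ i.toNat := by
    rw [← Int.natCast_dvd_natCast]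
    have : (d.toNat : Int) = d := by omega
    rw [this, hcast]; exact hdvd
  have hnp : ¬ i.toNat.Prime := by
    intro hp
    rcases hp.eq_one_or_self_of_dvd d.toNat hdn with h1 | h1 <;> omega
  have hne1 : i.toNat ≠ 1 := by omega
  have hqp : i.toNat.minFac.Prime := Nat.minFac_prime hne1
  have hqdvd : i.toNat.minFac ∣ i.toNat := Nat.minFac_dvd _
  have hqle : i.toNat.minFac ≤ i.toNat := Nat.le_of_dvd (by omega) hqdvd
  have hqlt : i.toNat.minFac < i.toNat := by
    rcases lt_or_eq_of_le hqle with h | h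
    · exact h
    · exact absurd (h ▸ hqp) hnp
  refine ⟨(i.toNat.minFac : Int), by exact_mod_cast hqp.two_le, by omega, ?_, ?_⟩
  · rw [pvIsPrime_iff]
    refine ⟨by exact_mod_cast hqp.two_le, fun e he2 helt hedvd => ?_⟩
    have hen : e.toNat ∣ i.toNat.minFac := by
      rw [← Int.natCast_dvd_natCast]
      have : (e.toNat : Int) = e := by omega
      rw [this]; exact hedvd
    rcases hqp.eq_one_or_self_of_dvd e.toNat hen with h1 | h1 <;> omega
  · rw [← hcast, Int.natCast_dvd_natCast]; exact hqdvd

-- A's inner scan over the primes found so far decides compositeness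
theorem any_div_eq (i : Int) (hi : 3 ≤ i) :
    ((PySem.List.pyRange 2 i 1).filter pvIsPrime).any (fun p => PySem.Int.mod i p == 0)
      = !pvIsPrime i := by
  rcases hcase : pvIsPrime i with hf | ht
  · -- pvIsPrime i = false: some prime in [2, i) divides i
    have hnot : ¬ (2 ≤ i ∧ ∀ d : Int, 2 ≤ d → d < i → ¬ d ∣ i) := by
      rw [← pvIsPrime_iff, hcase]; simp
    have hex : ∃ d : Int, 2 ≤ d ∧ d < i ∧ d ∣ i := by
      by_contra hc
      exact hnot ⟨by omega, fun d h1 h2 h3 => hc ⟨d, h1, h2, h3⟩⟩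
    obtain ⟨p, hp2, hpi, hpp, hpd⟩ := exists_prime_divisor i hi hex
    simp only [Bool.not_false, List.any_eq_true]
    exact ⟨p, by
      simp only [List.mem_filter, PySem.List.mem_pyRange_one]
      exact ⟨⟨hp2, hpi⟩, hpp⟩, (mod_dvd i p).mpr hpd⟩
  · -- pvIsPrime i = true: nothing in [2, i) divides i
    simp only [Bool.not_true, List.any_eq_false]
    intro p hp
    simp only [List.mem_filter, PySem.List.mem_pyRange_one] at hp
    obtain ⟨⟨hp2, hpi⟩, _⟩ := hp
    have := (pvIsPrime_iff i).mp hcase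
    intro hmod
    exact this.2 p hp2 hpi ((mod_dvd i p).mp hmod)

theorem fold_primes_aux (M : Int) (hM : 2 ≤ M) :
    (PySem.List.pyRange 3 (M + 1) 1).foldl
      (fun primes i =>
        if primes.any (fun p => PySem.Int.mod i p == 0) then primes else primes ++ [i])
      [2]
    = (PySem.List.pyRange 2 (M + 1) 1).filter pvIsPrime := by
  induction M, hM using Int.le_induction with
  | base =>
    have h2 : pvIsPrime 2 = true := by
      rw [pvIsPrime_iff]; exact ⟨by omega, fun d h1 h2 => by omega⟩
    rw [PySem.List.pyRange_one_eq_nil (by omega : (2:Int)+1 ≤ 3),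
        show (2:Int) + 1 = 2 + 1 from rfl, PySem.List.pyRange_one_singleton]
    simp [List.filter, h2]
  | succ M hM2 ih =>
    rw [show M + 1 + 1 = (M + 1) + 1 by ring]
    rw [PySem.List.pyRange_one_succ_right (by omega : (3:Int) ≤ M+1),
        PySem.List.pyRange_one_succ_right (by omega : (2:Int) ≤ M+1),
        List.foldl_append, List.filter_append, ih]
    simp only [List.foldl_cons, List.foldl_nil]
    rw [any_div_eq (M+1) (by omega)]
    rcases h : pvIsPrime (M+1) with _ | _
    · simp [List.filter, h]
    · simp [List.filter, h]

-- A's trial-division list is the pvIsPrime-filtered range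
theorem GetListOfPrimes_eq (N : Int) :
    GetListOfPrimes N = (PySem.List.pyRange 2 (N + 1) 1).filter pvIsPrime := by
  unfold GetListOfPrimes
  by_cases h2 : N < 2
  · rw [if_pos h2, PySem.List.pyRange_one_eq_nil (by omega)]; rfl
  · rw [if_neg h2]
    by_cases he : N = 2
    · subst he; norm_num
      have h2 : pvIsPrime 2 = true := by
        rw [pvIsPrime_iff]; exact ⟨by omega, fun d h1 h2 => by omega⟩
      rw [show (3:Int) = 2 + 1 from rfl, PySem.List.pyRange_one_singleton]
      simp [List.filter, h2]
    · have hbe : (N == 2) = false := by simp [he]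
      rw [hbe, if_neg (by simp)]
      exact fold_primes_aux N (by omega)

-- the two while loops agree when the set is the (duplicate-free) list itself
theorem while_congr (l : List Int) (a b : Int) :
    ∀ (f : Nat) (n : Int), pvWhileB l a b f n = pvWhileA l a b f n
  | 0, n => rfl
  | f + 1, n => by
    rw [pvWhileA, pvWhileB]
    by_cases h : (n * n + a * n + b) ∈ l
    · rw [if_pos ((PySem.Set.contains_iff l _).mpr h), if_pos h, while_congr l a b f (n + 1)]
    · rw [if_neg (by simp [h]), if_neg h]

theorem foldl_skip_all (m : Int) (g : Int × Int → Int → Int × Int) :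
    ∀ (l : List Int) (st : Int × Int), (∀ b ∈ l, b > m) →
      l.foldl (fun st b => if b > m then st else g st b) st = st
  | [], st, _ => rfl
  | c :: t, st, h => by
    rw [List.foldl_cons, if_pos (h c (by simp))]
    exact foldl_skip_all m g t st (fun b hb => h b (by simp [hb]))

-- skipping everything above m over a strictly increasing list = folding its takeWhile prefix
theorem foldl_skip_takeWhile (m : Int) (g g' : Int × Int → Int → Int × Int)
    (hg : ∀ st b, b ≤ m → g st b = g' st b) :
    ∀ (l : List Int), l.Pairwise (· < ·) → ∀ st,
      l.foldl (fun st b => if b > m then st else g st b) st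
        = (l.takeWhile (fun b => !decide (b > m))).foldl g' st
  | [], _, st => rfl
  | c :: t, hp, st => by
    obtain ⟨hc, ht⟩ := List.pairwise_cons.mp hp
    by_cases hcm : c > m
    · rw [List.takeWhile_cons, if_neg (by simp [hcm])]
      rw [List.foldl_cons, if_pos hcm, List.foldl_nil]
      exact foldl_skip_all m g t st (fun b hb => lt_trans hcm (hc b hb))
    · rw [List.takeWhile_cons, if_pos (by simp [hcm])]
      rw [List.foldl_cons, if_neg hcm, List.foldl_cons, hg st c (by omega)]
      exact foldl_skip_takeWhile m g g' hg t ht (g' st c)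

-- a fold that skips on a condition of f(p) = a fold of g over the filtered, mapped list
theorem foldl_filter_map (c : Int → Prop) [DecidablePred c] (f : Int → Int)
    (g : Int × Int → Int → Int × Int) :
    ∀ (l : List Int) (st : Int × Int),
      l.foldl (fun st p => if c (f p) then st else g st (f p)) st
        = ((l.filter (fun p => decide (¬ c (f p)))).map f).foldl g st
  | [], _ => rfl
  | p :: t, st => by
    rw [List.foldl_cons, List.filter_cons]
    by_cases h : c (f p)
    · rw [if_pos h]
      simp only [h, not_true, decide_false, Bool.false_eq_true]
      exact foldl_filter_map c f g t st
    · rw [if_neg h]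
      simp only [h, not_false_iff, decide_true, if_pos, List.map_cons, List.foldl_cons]
      exact foldl_filter_map c f g t (g st (f p))

-- two strictly increasing lists with the same members are equal
theorem eq_of_pairwise_lt_mem (l1 l2 : List Int)
    (h1 : l1.Pairwise (· < ·)) (h2 : l2.Pairwise (· < ·))
    (hm : ∀ x, x ∈ l1 ↔ x ∈ l2) : l1 = l2 := by
  have n1 : l1.Nodup := h1.imp (fun h => ne_of_lt h)
  have n2 : l2.Nodup := h2.imp (fun h => ne_of_lt h)
  exact ((List.perm_ext_iff_of_nodup n1 n2).mpr hm).eq_of_pairwise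
    (fun a b _ _ hab hba => absurd hba (not_lt.mpr hab.le)) h1 h2

-- the inner loops: A scans all primes p and derives a = p - b - 1; B scans the a-range directly
theorem inner_eq (m b : Int) (P : List Int) (hP : P.Pairwise (· < ·))
    (g : Int × Int → Int → Int × Int) (st : Int × Int) :
    P.foldl (fun st p => if |p - b - 1| ≥ m then st else g st (p - b - 1)) st
      = (PySem.List.pyRange (1 - m) m 1).foldl
          (fun st a => if (!PySem.Set.contains P (a + b + 1)) = true then st else g st a) st := by
  rw [foldl_filter_map (fun x => |x| ≥ m) (fun p => p - b - 1) g P st,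
      foldl_filter_map (fun a => (!PySem.Set.contains P (a + b + 1)) = true) (fun a => a) g
        (PySem.List.pyRange (1 - m) m 1) st, List.map_id']
  congr 1
  apply eq_of_pairwise_lt_mem
  · exact List.Pairwise.map _ (fun p q h => by omega) (hP.filter _)
  · exact (PySem.List.pairwise_lt_pyRange_one _ _).filter _
  · intro x
    simp only [List.mem_map, List.mem_filter, decide_eq_true_eq, PySem.List.mem_pyRange_one,
      Bool.not_eq_true', Bool.not_eq_false, PySem.Set.contains_iff, not_le]
    constructor
    · rintro ⟨p, ⟨hpP, hpa⟩, rfl⟩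
      have hb := abs_lt.mp hpa
      have hq : p - b - 1 + b + 1 = p := by ring
      exact ⟨⟨by omega, by omega⟩, by rw [hq]; exact hpP⟩
    · rintro ⟨⟨hx1, hx2⟩, hc⟩
      exact ⟨x + b + 1, ⟨hc, by rw [show x + b + 1 - b - 1 = x by ring, abs_lt]; omega⟩, by ring⟩

-- ===== VERDICT (by name: the statement is the Claim_ definition above) =====
theorem QuadraticPrimes_spec : Claim_equal_QuadraticPrimes := by
  intro m _
  show QuadraticPrimes m = QuadraticPrimes_alt m
  unfold QuadraticPrimes QuadraticPrimes_alt pvPrimesB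
  simp only [GetListOfPrimes_eq]
  have hnd : ((PySem.List.pyRange 2 (2 * m + 1 + 1) 1).filter pvIsPrime).Nodup :=
    (PySem.List.nodup_pyRange_one _ _).filter _
  rw [PySem.Set.ofList_eq_self_of_nodup _ hnd]
  simp only [while_congr]
  have hP : ((PySem.List.pyRange 2 (2 * m + 1 + 1) 1).filter pvIsPrime).Pairwise (· < ·) :=
    (PySem.List.pairwise_lt_pyRange_one _ _).filter _
  exact foldl_skip_takeWhile m _ _
    (fun st b _ => inner_eq m b _ hP
      (fun st a =>
        if pvWhileA ((PySem.List.pyRange 2 (2 * m + 1 + 1) 1).filter pvIsPrime) a b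
              (2 * m + 8).toNat 2 > st.2 then
          (a * b,
            pvWhileA ((PySem.List.pyRange 2 (2 * m + 1 + 1) 1).filter pvIsPrime) a b
              (2 * m + 8).toNat 2)
        else st) st) _ hP (0, 0)
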